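-- pv_equiv track=rewrite | github.com/JulienLefevreMars/Vrac | SchellingModel/schelling_model.py | satisfaction
-- ===== SOURCE A (Python) =====
-- def satisfaction(s,val,T=8):
-- 	if val == 0:
-- 		if s == T:
-- 			return False
-- 		if s>=4:
-- 			return False
-- 		return True
-- 	return satisfaction(T-s,0)
-- ===== SOURCE B (Python) =====
-- def satisfaction(s, val, T=8):
--     # Non-recursive: the depth-1 self-call satisfaction(T-s, 0) uses the DEFAULT
--     # threshold 8, so T-s == 8 is subsumed by T-s >= 4 and it reduces to T-s < 4.
--     if val == 0:
--         return s != T and s < 4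
--     return T - s < 4
-- ===== Notes on version B (the rewrite author's own statement) =====
-- stated objective: simpler
-- what changed: Replaced the depth-1 recursive self-call (which silently uses the default T=8, making its s==T guard redundant) by direct boolean expressions per branch, with no recursion.
import Mathlib
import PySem

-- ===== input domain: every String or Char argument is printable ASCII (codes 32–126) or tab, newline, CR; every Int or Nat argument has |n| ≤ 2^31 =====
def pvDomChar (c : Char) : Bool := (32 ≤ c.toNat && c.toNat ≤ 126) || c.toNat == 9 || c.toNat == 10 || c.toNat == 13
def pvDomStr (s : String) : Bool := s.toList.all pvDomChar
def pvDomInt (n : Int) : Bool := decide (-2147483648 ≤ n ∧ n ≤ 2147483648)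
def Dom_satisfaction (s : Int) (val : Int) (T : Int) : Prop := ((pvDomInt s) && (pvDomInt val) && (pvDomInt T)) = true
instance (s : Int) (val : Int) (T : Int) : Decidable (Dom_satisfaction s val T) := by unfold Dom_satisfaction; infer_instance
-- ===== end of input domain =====

-- B replaces A's depth-1 self-call (which uses the default threshold 8) by direct boolean expressions; objective: simpler.


-- ===== PORT A =====
-- literal transliteration of A: branch order preserved; the recursive call uses the default T=8
def satisfaction (s : Int) (val : Int) (T : Int) : Bool :=
  if val == 0 then
    if s == T then false
    else if s ≥ 4 then false
    else true
  else
    -- satisfaction(T-s, 0) with default T=8, unfolded once (val argument is 0, so no further recursion)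
    if (T - s) == 8 then false
    else if (T - s) ≥ 4 then false
    else true

-- ===== PORT B =====
-- B: no recursion, one boolean expression per branch
def satisfaction_alt (s : Int) (val : Int) (T : Int) : Bool :=
  if val == 0 then s != T && s < 4 else T - s < 4

-- ===== PRECONDITION & SPEC =====
def Spec_satisfaction (s : Int) (val : Int) (T : Int) (out : Bool) : Prop := out = satisfaction_alt s val T
instance (s : Int) (val : Int) (T : Int) (out : Bool) : Decidable (Spec_satisfaction s val T out) := by unfold Spec_satisfaction; infer_instance

-- ===== CLAIM (what is proved, stated in full; the proofs are below) =====
def Claim_equal_satisfaction : Prop := ∀ (s : Int) (val : Int) (T : Int), Dom_satisfaction s val T → Spec_satisfaction s val T (satisfaction s val T)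

-- ===== LEMMAS AND PROOFS =====

-- ===== VERDICT (by name: the statement is the Claim_ definition above) =====
theorem satisfaction_spec : Claim_equal_satisfaction := by
  intro s val T _
  unfold Spec_satisfaction satisfaction satisfaction_alt
  by_cases hv : val = 0
  · by_cases h1 : s = T <;> by_cases h2 : (4:Int) ≤ s <;> simp [hv, h1, h2] <;> omega
  · by_cases h1 : T - s = 8 <;> by_cases h2 : (4:Int) ≤ T - s <;> simp [hv, h1, h2] <;> omega
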